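-- pv_equiv track=rewrite | github.com/NolanFoster/seasoned-app | recipe-generation-worker/scripts/grocery_opik_helpers.py | duplicate_input_text_group_count
-- ===== SOURCE A (Python) =====
-- from collections import Counter
-- from typing import Any
--
-- def duplicate_input_text_group_count(rows: list[dict[str, Any]]) -> int:
--     """
--     Count how many distinct normalized input_text values appear in more than one row.
--     Normalization matches optimize.py dataset validation: strip + casefold (via lower).
--     Rows without a non-empty string input_text are ignored.
--     """
--     seen: Counter[str] = Counter()
--     for row in rows:
--         if not isinstance(row, dict):
--             continue
--         input_text = row.get("input_text")
--         if isinstance(input_text, str) and input_text.strip():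
--             seen[input_text.strip().lower()] += 1
--     return sum(1 for _, count in seen.items() if count > 1)
-- ===== SOURCE B (Python) =====
-- def duplicate_input_text_group_count(rows):
--     """Sort the normalized keys, then count runs of length > 1 with an index scan."""
--     keys = []
--     for row in rows:
--         if isinstance(row, dict):
--             t = row.get("input_text")
--             if isinstance(t, str) and t.strip():
--                 keys.append(t.strip().lower())
--     keys.sort()
--     dup = 0
--     i = 0
--     n = len(keys)
--     while i < n:
--         j = i + 1
--         while j < n and keys[j] == keys[i]:
--             j += 1
--         if j - i > 1:
--             dup += 1
--         i = j
--     return dup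
-- ===== Notes on version B (the rewrite author's own statement) =====
-- stated objective: alternative
-- what changed: Replaces A's Counter build plus final items-filter with sort-then-scan: collect the normalized keys, sort them, and count maximal runs of adjacent equal keys whose length exceeds 1.
import Mathlib
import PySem

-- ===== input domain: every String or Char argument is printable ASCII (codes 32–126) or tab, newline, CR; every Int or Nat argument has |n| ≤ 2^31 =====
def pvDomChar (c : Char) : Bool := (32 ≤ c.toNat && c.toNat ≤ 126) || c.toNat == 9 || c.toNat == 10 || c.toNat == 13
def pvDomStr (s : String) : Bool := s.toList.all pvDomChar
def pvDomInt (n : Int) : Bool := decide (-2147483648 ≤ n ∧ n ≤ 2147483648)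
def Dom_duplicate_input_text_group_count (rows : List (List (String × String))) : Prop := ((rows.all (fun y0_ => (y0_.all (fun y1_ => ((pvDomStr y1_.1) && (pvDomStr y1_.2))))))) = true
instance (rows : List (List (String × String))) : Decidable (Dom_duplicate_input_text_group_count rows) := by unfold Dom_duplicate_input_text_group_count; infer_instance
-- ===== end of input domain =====

-- B replaces A's Counter build + final items-filter with sort-then-scan over runs of equal keys; objective: alternative.

-- ===== PORT A =====
-- loop body of A: row.get("input_text") via Dict lookup; truthiness test on input_text.strip(); Counter increment via Dict.modify
def stepA (d : PySem.Dict String Int) (row : List (String × String)) : PySem.Dict String Int :=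
  match (PySem.Dict.mk row).get? "input_text" with
  | none => d
  | some input_text =>
    if PySem.Str.strip input_text ≠ "" then
      d.modify (PySem.Str.lower (PySem.Str.strip input_text)) 0 (· + 1)
    else d

-- the Counter loop, then sum(1 for _, count in seen.items() if count > 1)
def duplicate_input_text_group_count (rows : List (List (String × String))) : Int :=
  (rows.foldl stepA PySem.Dict.empty).items.foldl
    (fun acc kv => if kv.2 > 1 then acc + 1 else acc) (0 : Int)

-- ===== PORT B =====
-- B's first loop body: append the normalized key if the row has a non-empty input_text
def pvStepB (acc : List String) (row : List (String × String)) : List String :=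
  match (PySem.Dict.mk row).get? "input_text" with
  | none => acc
  | some t =>
    if PySem.Str.strip t ≠ "" then acc ++ [PySem.Str.lower (PySem.Str.strip t)] else acc

-- B's first loop: collect the normalized keys (keys.append(...))
def pvKeysOf (rows : List (List (String × String))) : List String :=
  rows.foldl pvStepB []

-- B's index scan over the sorted key list: the inner 'while keys[j] == keys[i]' advance is
-- takeWhile/dropWhile of the current run; 'if j - i > 1: dup += 1' counts runs longer than 1
def pvRunScan : List String → Int
  | [] => 0
  | x :: xs =>
    (if xs.takeWhile (· == x) = [] then 0 else 1) + pvRunScan (xs.dropWhile (· == x))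
termination_by l => l.length
decreasing_by
  have := List.length_dropWhile_le (· == x) xs
  simp only [List.length_cons]
  omega

-- keys.sort() then the run scan
def duplicate_input_text_group_count_alt (rows : List (List (String × String))) : Int :=
  pvRunScan (PySem.List.sorted (pvKeysOf rows) (fun s => s) false)

-- ===== PRECONDITION & SPEC =====
def Spec_duplicate_input_text_group_count (rows : List (List (String × String))) (out : Int) : Prop := out = duplicate_input_text_group_count_alt rows
instance (rows : List (List (String × String))) (out : Int) : Decidable (Spec_duplicate_input_text_group_count rows out) := by unfold Spec_duplicate_input_text_group_count; infer_instance

-- ===== CLAIM (what is proved, stated in full; the proofs are below) =====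
def Claim_equal_duplicate_input_text_group_count : Prop := ∀ (rows : List (List (String × String))), Dom_duplicate_input_text_group_count rows → Spec_duplicate_input_text_group_count rows (duplicate_input_text_group_count rows)

-- ===== LEMMAS AND PROOFS =====

-- the normalized key a row contributes, if any
def pvKey (row : List (String × String)) : Option String :=
  match (PySem.Dict.mk row).get? "input_text" with
  | none => none
  | some t => if PySem.Str.strip t ≠ "" then some (PySem.Str.lower (PySem.Str.strip t)) else none

-- A's row loop, over the extracted key list
theorem foldA_eq (rows : List (List (String × String))) (d0 : PySem.Dict String Int) :
    rows.foldl stepA d0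
    = (rows.filterMap pvKey).foldl (fun d k => d.modify k 0 (· + 1)) d0 := by
  induction rows generalizing d0 with
  | nil => rfl
  | cons r rs ih =>
    simp only [List.foldl_cons, List.filterMap_cons]
    cases h : (PySem.Dict.mk r).get? "input_text" with
    | none =>
      rw [show pvKey r = none from by simp [pvKey, h]]
      rw [show stepA d0 r = d0 from by simp [stepA, h]]
      exact ih d0
    | some t =>
      by_cases hs : PySem.Str.strip t = ""
      · rw [show pvKey r = none from by simp [pvKey, h, hs]]
        rw [show stepA d0 r = d0 from by simp [stepA, h, hs]]
        exact ih d0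
      · rw [show pvKey r = some (PySem.Str.lower (PySem.Str.strip t)) from by
          simp [pvKey, h, hs]]
        rw [show stepA d0 r = d0.modify (PySem.Str.lower (PySem.Str.strip t)) 0 (· + 1) from by
          simp [stepA, h, hs]]
        simp only [List.foldl_cons]
        exact ih _

-- B's key-collecting loop is the same extracted key list
theorem keysOf_eq (rows : List (List (String × String))) (acc : List String) :
    rows.foldl pvStepB acc = acc ++ rows.filterMap pvKey := by
  induction rows generalizing acc with
  | nil => simp
  | cons r rs ih =>
    simp only [List.foldl_cons, List.filterMap_cons]
    cases h : (PySem.Dict.mk r).get? "input_text" with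
    | none =>
      rw [show pvKey r = none from by simp [pvKey, h]]
      rw [show pvStepB acc r = acc from by simp [pvStepB, h]]
      exact ih acc
    | some t =>
      by_cases hs : PySem.Str.strip t = ""
      · rw [show pvKey r = none from by simp [pvKey, h, hs]]
        rw [show pvStepB acc r = acc from by simp [pvStepB, h, hs]]
        exact ih acc
      · rw [show pvKey r = some (PySem.Str.lower (PySem.Str.strip t)) from by
          simp [pvKey, h, hs]]
        rw [show pvStepB acc r = acc ++ [PySem.Str.lower (PySem.Str.strip t)] from by
          simp [pvStepB, h, hs]]
        rw [ih (acc ++ [PySem.Str.lower (PySem.Str.strip t)])]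
        simp

-- counting items with value > 1 is the length of the filtered items list
theorem foldl_count_gt_one (l : List (String × Int)) (acc : Int) :
    l.foldl (fun acc kv => if kv.2 > 1 then acc + 1 else acc) acc
    = acc + ((l.filter (fun kv => kv.2 > 1)).length : Int) := by
  induction l generalizing acc with
  | nil => simp
  | cons kv rest ih =>
    by_cases h : kv.2 > 1
    · simp [h, ih]; ring
    · simp [h, ih]

-- on a ≤-sorted list, the run scan counts the distinct elements occurring more than once
theorem runScan_sorted (l : List String) :
    l.Pairwise (· ≤ ·) → pvRunScan l = ((l.toFinset.filter (fun x => 1 < l.count x)).card : Int) := by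
  induction l using pvRunScan.induct with
  | case1 => intro _; rw [pvRunScan]; simp
  | case2 x xs ih =>
      intro hp
      have hple : ∀ y ∈ xs, x ≤ y := fun y hy => List.rel_of_pairwise_cons hp hy
      have hpxs : xs.Pairwise (· ≤ ·) := hp.of_cons
      set run := xs.takeWhile (· == x) with hrun
      set rest := xs.dropWhile (· == x) with hrest
      have hsplit : run ++ rest = xs := List.takeWhile_append_dropWhile
      have hrunx : ∀ y ∈ run, y = x := by
        intro y hy
        have := List.mem_takeWhile_imp hy
        simpa using this
      have hrestp : rest.Pairwise (· ≤ ·) :=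
        List.Pairwise.sublist (List.dropWhile_sublist (· == x)) hpxs
      have hrestgt : ∀ z ∈ rest, x < z := by
        cases hrcase : rest with
        | nil => intro z hz; simp at hz
        | cons y t =>
          have hyne : y ≠ x := by
            have h0 := List.head?_dropWhile_not (· == x) xs
            rw [← hrest, hrcase] at h0
            simpa using h0
          have hymem : y ∈ xs := by rw [← hsplit, hrcase]; simp
          have hxy : x < y := lt_of_le_of_ne (hple y hymem) (Ne.symm hyne)
          intro z hz
          rcases List.mem_cons.mp hz with h | h
          · exact h ▸ hxy
          · have hyz : y ≤ z := List.rel_of_pairwise_cons (hrcase ▸ hrestp) h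
            exact lt_of_lt_of_le hxy hyz
      have hxrest : x ∉ rest := fun h => absurd (hrestgt x h) (lt_irrefl x)
      have hcountx : (x :: xs).count x = 1 + run.length := by
        have hcrun : run.count x = run.length :=
          List.count_eq_length.mpr (fun y hy => ((hrunx y hy).symm : x = y))
        have hcrest : rest.count x = 0 := List.count_eq_zero.mpr hxrest
        rw [List.count_cons_self, ← hsplit, List.count_append, hcrun, hcrest]
        omega
      have hcounty : ∀ y, y ≠ x → (x :: xs).count y = rest.count y := by
        intro y hy
        have hcrun : run.count y = 0 :=
          List.count_eq_zero.mpr (fun h => hy (hrunx y h))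
        have hcc : (x :: xs).count y = xs.count y := by
          rw [List.count_cons]; simp [Ne.symm hy]
        rw [hcc, ← hsplit, List.count_append, hcrun]
        omega
      have htf : (x :: xs).toFinset = insert x rest.toFinset := by
        ext a
        simp only [List.mem_toFinset, Finset.mem_insert, List.mem_cons, ← hsplit,
          List.mem_append]
        constructor
        · rintro (h | h | h)
          · exact Or.inl h
          · exact Or.inl (hrunx a h)
          · exact Or.inr (by simpa using h)
        · rintro (h | h)
          · exact Or.inl h
          · exact Or.inr (Or.inr (by simpa using h))
      have ihrest := ih hrestp
      -- the rest-side filter has the same predicate under the full list's counts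
      have hfilter_rest :
          rest.toFinset.filter (fun y => 1 < (x :: xs).count y)
          = rest.toFinset.filter (fun y => 1 < rest.count y) := by
        apply Finset.filter_congr
        intro y hy
        have hyx : y ≠ x := fun h => hxrest (h ▸ List.mem_toFinset.mp hy)
        rw [hcounty y hyx]
      rw [pvRunScan, ← hrun, ← hrest, ihrest, htf]
      by_cases hr0 : run = []
      · have hc1 : ¬ (1 < (x :: xs).count x) := by
          rw [hcountx, hr0]; simp
        rw [Finset.filter_insert, if_neg hc1, hfilter_rest, if_pos hr0]
        omega
      · have hc1 : 1 < (x :: xs).count x := by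
          rw [hcountx]
          have : 0 < run.length := List.length_pos_iff.mpr hr0
          omega
        have hxnot : x ∉ rest.toFinset.filter (fun y => 1 < (x :: xs).count y) := by
          simp only [Finset.mem_filter, List.mem_toFinset]
          exact fun h => hxrest h.1
        rw [Finset.filter_insert, if_pos hc1, Finset.card_insert_of_notMem hxnot,
          hfilter_rest, if_neg hr0]
        push_cast
        omega

-- ===== VERDICT (by name: the statement is the Claim_ definition above) =====
theorem duplicate_input_text_group_count_spec : Claim_equal_duplicate_input_text_group_count := by
  intro rows _
  unfold Spec_duplicate_input_text_group_count
  unfold duplicate_input_text_group_count duplicate_input_text_group_count_alt pvKeysOf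
  rw [foldA_eq, keysOf_eq]
  simp only [List.nil_append]
  set ks := rows.filterMap pvKey with hks
  -- A's dict fold is Counter(ks)
  rw [show (ks.foldl (fun (d : PySem.Dict String Int) k => d.modify k 0 (· + 1)) PySem.Dict.empty)
        = PySem.Dict.counter ks from (PySem.Dict.counter_eq_foldl ks).symm]
  rw [foldl_count_gt_one, PySem.Dict.items_counter]
  rw [List.filter_map, List.length_map]
  -- B's side: the sorted list is a permutation of ks
  set sks := PySem.List.sorted ks (fun s => s) false with hsks
  have hperm : sks.Perm ks := PySem.List.sorted_perm ks (fun s => s) false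
  have hpair : sks.Pairwise (· ≤ ·) := by
    simpa using PySem.List.sorted_pairwise ks (fun s => s)
  rw [runScan_sorted sks hpair]
  -- both sides are cards of the same finset
  have hfn : ((PySem.Set.ofList ks).filter
      ((fun kv : String × Int => decide (1 < kv.2)) ∘ fun k => (k, (ks.count k : Int)))).Nodup :=
    (PySem.Set.nodup_ofList ks).filter _
  rw [← List.toFinset_card_of_nodup hfn]
  have hset : sks.toFinset.filter (fun x => 1 < sks.count x)
      = ((PySem.Set.ofList ks).filter
        ((fun kv : String × Int => decide (1 < kv.2)) ∘ fun k => (k, (ks.count k : Int)))).toFinset := by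
    ext x
    simp only [Finset.mem_filter, List.mem_toFinset, List.mem_filter, PySem.Set.mem_ofList,
      Function.comp_apply, decide_eq_true_eq, hperm.mem_iff, hperm.count_eq]
    constructor
    · rintro ⟨h1, h2⟩
      exact ⟨h1, by exact_mod_cast h2⟩
    · rintro ⟨h1, h2⟩
      exact ⟨h1, by exact_mod_cast h2⟩
  rw [hset]
  omega
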